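-- pv_equiv track=rewrite | github.com/phetdam/daily-coding-problem | mappings.py | all_maps
-- ===== SOURCE A (Python) =====
-- def all_maps(mp, s):
--     """
--     poop
--     """
--     assert (mp is not None) and (s is not None) and len(s) > 0
--     # get length of string
--     n = len(s)
--     # number of possible combinations
--     N = 1
--     # list of how many times each possible mapping for each character needs
--     # to be repeated before printing the next possible mapping
--     mreps = [None for _ in range(n)]
--     # for each element e in the string, multiply len(mp[e]) with N to get
--     # total number of permutations to return
--     for e in s: N = N * len(mp[e])
--     # output list becomes N empty strings
--     outl = ["" for _ in range(N)]
--     # populate mreps; mreps[n - 1] = 1, mreps[n - 2] = len(mp[str(n - 1)]),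
--     # mreps[n - 3] = mreps[n - 2] * len(mp[str(n - 2)]), etc.
--     mreps[n - 1] = 1
--     for i in range(1, n):
--         mreps[n - i - 1] = mreps[n - i] * len(mp[s[n - i]])
--     # for each ith character in the string
--     for i in range(n):
--         # current mapping of the ith character to use
--         j = 0
--         # for all possible combinations to put in outl
--         for c in range(N):
--             # append mapping to cth string in outl
--             outl[c] = outl[c] + mp[s[i]][j]
--             # if c + 1 % mreps[i] == 0, increment j if (j + 1) < len(mp[s[i]]),
--             # else reset j to 0 again
--             if (c + 1) % mreps[i] == 0:
--                 jl = len(mp[s[i]])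
--                 if (j + 1) < jl: j = j + 1
--                 else: j = 0
--     # return outl
--     return outl
-- ===== SOURCE B (Python) =====
-- def all_maps(mp, s):
--     """
--     poop
--     """
--     assert (mp is not None) and (s is not None) and len(s) > 0
--     # grow the combinations row by row: extend every partial string by each
--     # mapping of the next character (last character varies fastest)
--     outl = [""]
--     for ch in s:
--         outl = [prefix + rep for prefix in outl for rep in mp[ch]]
--     return outl
-- ===== Notes on version B (the rewrite author's own statement) =====
-- stated objective: idiomatic
-- what changed: Replaces the N-preallocated output table, the mreps repetition-count array and the modular counter j with a single row-by-row fold that extends every partial string by each mapping of the next character (a hand-rolled itertools.product).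
import Mathlib
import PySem

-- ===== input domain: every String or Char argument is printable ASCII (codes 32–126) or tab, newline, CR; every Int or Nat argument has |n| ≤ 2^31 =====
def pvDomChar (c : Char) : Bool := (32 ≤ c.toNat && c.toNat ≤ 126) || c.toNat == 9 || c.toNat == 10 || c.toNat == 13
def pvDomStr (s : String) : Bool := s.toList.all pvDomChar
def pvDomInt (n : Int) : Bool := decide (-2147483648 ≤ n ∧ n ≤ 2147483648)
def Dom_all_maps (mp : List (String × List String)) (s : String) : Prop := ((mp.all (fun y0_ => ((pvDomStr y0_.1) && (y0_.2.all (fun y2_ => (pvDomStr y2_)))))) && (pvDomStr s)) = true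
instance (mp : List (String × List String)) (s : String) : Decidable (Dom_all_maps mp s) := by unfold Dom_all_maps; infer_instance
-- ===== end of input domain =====

-- B replaces A's preallocated output table, mreps repetition counts and modular counter
-- with a row-by-row fold extending every partial string by each mapping of the next character.

-- shared primitive: Python's mp[<one-char string>] (first match in the association list; [] only outside Pre_)
def pvLookup (mp : List (String × List String)) (c : Char) : List String :=
  (List.lookup (String.ofList [c]) mp).getD []

-- ===== PORT A =====
-- inner loop of A: 'for c in range(N): outl[c] = outl[c] + mp[s[i]][j]; …' with the modular counter j
def pvInner (mi : List String) (mrep : Nat) (N : Nat) (o : List String) : List String :=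
  ((List.range N).foldl
    (fun st c =>
      (st.1.set c (st.1.getD c "" ++ mi.getD st.2 ""),
       if (c + 1) % mrep = 0 then (if st.2 + 1 < mi.length then st.2 + 1 else 0) else st.2))
    (o, 0)).1

-- first k iterations of A's mreps-filling loop (A runs it for k = n - 1 steps)
def pvMrepsLoop (mp : List (String × List String)) (cs : List Char) (k : Nat) : List Nat :=
  (List.range k).foldl
    (fun mr i0 =>
      mr.set (cs.length - (i0 + 1) - 1)
        (mr.getD (cs.length - (i0 + 1)) 0 * (pvLookup mp (cs.getD (cs.length - (i0 + 1)) ' ')).length))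
    ((List.replicate cs.length 0).set (cs.length - 1) 1)

def all_maps (mp : List (String × List String)) (s : String) : List String :=
  let cs := s.toList
  let n := cs.length
  let N := cs.foldl (fun acc e => acc * (pvLookup mp e).length) 1
  -- mreps[n-1] = 1; for i in range(1, n): mreps[n-i-1] = mreps[n-i] * len(mp[s[n-i]])
  let mreps := pvMrepsLoop mp cs (n - 1)
  (List.range n).foldl
    (fun o i => pvInner (pvLookup mp (cs.getD i ' ')) (mreps.getD i 0) N o)
    (List.replicate N "")

-- ===== PORT B =====
def all_maps_alt (mp : List (String × List String)) (s : String) : List String :=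
  s.toList.foldl
    (fun outl ch => outl.flatMap (fun p => (pvLookup mp ch).map (fun rep => p ++ rep)))
    [""]

-- ===== PRECONDITION & SPEC =====
-- Pre_ excludes exactly where the Python A raises: empty s (AssertionError) and a
-- character of s missing from mp (KeyError).
def Pre_all_maps (mp : List (String × List String)) (s : String) : Prop :=
  s.toList ≠ [] ∧ s.toList.all (fun c => (List.lookup (String.ofList [c]) mp).isSome) = true
instance (mp : List (String × List String)) (s : String) : Decidable (Pre_all_maps mp s) := by
  unfold Pre_all_maps; infer_instance
def pvWitness_all_maps : (List (String × List String)) × String :=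
  ([("a", ["x", "y"]), ("b", ["z"])], "ab")

def Spec_all_maps (mp : List (String × List String)) (s : String) (out : List String) : Prop := out = all_maps_alt mp s
instance (mp : List (String × List String)) (s : String) (out : List String) : Decidable (Spec_all_maps mp s out) := by unfold Spec_all_maps; infer_instance

-- ===== CLAIM (what is proved, stated in full; the proofs are below) =====
def Claim_equal_all_maps : Prop := ∀ (mp : List (String × List String)) (s : String), Dom_all_maps mp s → Pre_all_maps mp s → Spec_all_maps mp s (all_maps mp s)

-- ===== LEMMAS AND PROOFS =====

-- number of combinations of a suffix: product of the mapping lengths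
def pvN (mp : List (String × List String)) : List Char → Nat
  | [] => 1
  | c :: r => (pvLookup mp c).length * pvN mp r

-- the c-th combination (mixed-radix digits of c, most significant first)
def pvDig (mp : List (String × List String)) : List Char → Nat → String
  | [], _ => ""
  | c :: r, k => (pvLookup mp c).getD (k / pvN mp r) "" ++ pvDig mp r (k % pvN mp r)

theorem pvLen_pos_of_pvN_pos {mp : List (String × List String)} {l : List Char}
    (h : 0 < pvN mp l) : ∀ c ∈ l, 0 < (pvLookup mp c).length := by
  induction l with
  | nil => simp
  | cons c r ih =>
      intro x hx
      rcases List.mem_cons.1 hx with rfl | hx'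
      · rcases Nat.eq_zero_or_pos (pvLookup mp x).length with h0 | hp
        · simp [pvN, h0] at h
        · exact hp
      · rcases Nat.eq_zero_or_pos (pvN mp r) with h0 | hp
        · simp [pvN, h0] at h
        · exact ih hp x hx'

theorem pvN_foldl (mp : List (String × List String)) (l : List Char) :
    ∀ a : Nat, l.foldl (fun acc e => acc * (pvLookup mp e).length) a = a * pvN mp l := by
  induction l with
  | nil => intro a; simp [pvN]
  | cons c r ih => intro a; simp [List.foldl_cons, ih, pvN, Nat.mul_assoc]

-- getD / set on a (range N).map f table
theorem getD_map_range' (f : Nat → String) (N k : Nat) (d : String) :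
    ((List.range N).map f).getD k d = if k < N then f k else d := by
  rw [List.getD_eq_getElem?_getD, List.getElem?_map]
  by_cases h : k < N
  · rw [List.getElem?_range h]
    simp [h]
  · rw [List.getElem?_eq_none (by simpa using Nat.not_lt.1 h)]
    simp [h]

theorem set_map_range (f : Nat → String) (N k : Nat) (v : String) (_hk : k < N) :
    ((List.range N).map f).set k v = (List.range N).map (fun c => if c = k then v else f c) := by
  apply List.ext_getElem
  · simp
  · intro i h1 h2
    simp only [List.getElem_set, List.getElem_map, List.getElem_range]
    simp at h1
    by_cases h : k = i
    · simp [h]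
    · simp [h, Ne.symm h]

-- the modular counter j follows the closed form (k / mrep) % l
theorem jnext (mrep l k : Nat) (hl : 0 < l) :
    (if (k + 1) % mrep = 0 then (if (k / mrep) % l + 1 < l then (k / mrep) % l + 1 else 0)
     else (k / mrep) % l) = ((k + 1) / mrep) % l := by
  have hml : (k / mrep) % l < l := Nat.mod_lt _ hl
  by_cases h : (k + 1) % mrep = 0
  · have hdvd : mrep ∣ k + 1 := Nat.dvd_iff_mod_eq_zero.2 h
    have hdiv : (k + 1) / mrep = k / mrep + 1 := by
      rw [Nat.succ_div]; simp [hdvd]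
    rw [hdiv]
    set x := k / mrep with hx
    have hmod : (x + 1) % l = (x % l + 1) % l := by
      conv_lhs => rw [Nat.add_mod]
      rcases Nat.eq_or_lt_of_le hl with h1 | h1
      · simp [← h1]
      · rw [Nat.mod_eq_of_lt h1, Nat.add_mod]
    by_cases hlt : x % l + 1 < l
    · simp [h, hlt, hmod, Nat.mod_eq_of_lt hlt]
    · have : x % l + 1 = l := by omega
      simp [h, hmod, this]
  · have hndvd : ¬ mrep ∣ k + 1 := fun hd => h (Nat.dvd_iff_mod_eq_zero.1 hd)
    have hdiv : (k + 1) / mrep = k / mrep := by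
      rw [Nat.succ_div]; simp [hndvd]
    simp [h, hdiv]

-- inner loop invariant: after k steps the first k cells are extended and j = (k/mrep) % l
theorem inner_inv (L : List String) (mrep N : Nat) (f : Nat → String)
    (hl : 0 < L.length) :
    ∀ k, k ≤ N →
      (List.range k).foldl
        (fun st c =>
          (st.1.set c (st.1.getD c "" ++ L.getD st.2 ""),
           if (c + 1) % mrep = 0 then (if st.2 + 1 < L.length then st.2 + 1 else 0) else st.2))
        ((List.range N).map f, 0)
      = ((List.range N).map (fun c => if c < k then f c ++ L.getD ((c / mrep) % L.length) "" else f c),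
         (k / mrep) % L.length) := by
  intro k
  induction k with
  | zero =>
      intro _
      simp
  | succ k ih =>
      intro hk
      have hkN : k < N := hk
      rw [List.range_succ, List.foldl_append, ih (Nat.le_of_lt hkN)]
      simp only [List.foldl_cons, List.foldl_nil, Prod.mk.injEq]
      refine ⟨?_, ?_⟩
      · rw [getD_map_range' _ _ _ _, if_pos hkN]
        simp only [Nat.lt_irrefl, if_false]
        rw [set_map_range _ _ _ _ hkN]
        apply List.map_congr_left
        intro c _
        by_cases h1 : c = k
        · subst h1; simp
        · by_cases h2 : c < k <;> by_cases h3 : c < k + 1 <;> simp [h1, h2, h3] <;> omega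
      · exact jnext mrep L.length k hl

theorem pvInner_map_range (L : List String) (mrep N : Nat) (f : Nat → String)
    (hl : 0 < L.length) :
    pvInner L mrep N ((List.range N).map f)
      = (List.range N).map (fun c => if c < N then f c ++ L.getD ((c / mrep) % L.length) "" else f c) := by
  unfold pvInner
  rw [inner_inv L mrep N f hl N (Nat.le_refl N)]

-- the mreps table holds the suffix products
theorem pvMrepsLoop_succ (mp : List (String × List String)) (cs : List Char) (k : Nat) :
    pvMrepsLoop mp cs (k + 1)
      = (pvMrepsLoop mp cs k).set (cs.length - (k + 1) - 1)
          ((pvMrepsLoop mp cs k).getD (cs.length - (k + 1)) 0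
            * (pvLookup mp (cs.getD (cs.length - (k + 1)) ' ')).length) := by
  unfold pvMrepsLoop
  rw [List.range_succ, List.foldl_append, List.foldl_cons, List.foldl_nil]

theorem mreps_inv (mp : List (String × List String)) (cs : List Char) (hcs : cs ≠ []) :
    ∀ k, k ≤ cs.length - 1 →
      (pvMrepsLoop mp cs k).length = cs.length ∧
      ∀ j, (pvMrepsLoop mp cs k).getD j 0
        = if cs.length - 1 - k ≤ j ∧ j < cs.length then pvN mp (cs.drop (j + 1)) else 0 := by
  have hn : 0 < cs.length := List.length_pos_of_ne_nil hcs
  intro k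
  induction k with
  | zero =>
      intro _
      refine ⟨by simp [pvMrepsLoop], ?_⟩
      intro j
      unfold pvMrepsLoop
      rw [List.range_zero, List.foldl_nil, List.getD_eq_getElem?_getD, List.getElem?_set]
      rcases Nat.lt_or_ge j cs.length with hjn | hjn
      · by_cases hj : cs.length - 1 = j
        · have hdrop : cs.drop (j + 1) = [] := List.drop_eq_nil_of_le (by omega)
          have hcond : cs.length - 1 - 0 ≤ j ∧ j < cs.length := by omega
          rw [if_pos hj, if_pos (by simp; omega), if_pos hcond, hdrop]
          rfl
        · rw [if_neg hj, List.getElem?_replicate, if_pos hjn, if_neg (by omega)]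
          rfl
      · rw [if_neg (by omega), List.getElem?_replicate, if_neg (by omega), if_neg (by omega)]
        rfl
  | succ k ih =>
      intro hk
      obtain ⟨hlen, hval⟩ := ih (by omega)
      rw [pvMrepsLoop_succ]
      have hidx : cs.length - (k + 1) - 1 = cs.length - k - 2 := by omega
      have hread : cs.length - (k + 1) = cs.length - k - 1 := by omega
      have hr1 : (pvMrepsLoop mp cs k).getD (cs.length - k - 1) 0
          = pvN mp (cs.drop (cs.length - k)) := by
        rw [hval]
        have hc : cs.length - 1 - k ≤ cs.length - k - 1 ∧ cs.length - k - 1 < cs.length := by omega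
        rw [if_pos hc, show cs.length - k - 1 + 1 = cs.length - k from by omega]
      have hget : cs.getD (cs.length - k - 1) ' ' = cs[cs.length - k - 1]'(by omega) := by
        rw [List.getD_eq_getElem?_getD, List.getElem?_eq_getElem (by omega)]
        rfl
      have hsuffix : cs.drop (cs.length - k - 2 + 1)
          = cs[cs.length - k - 1]'(by omega) :: cs.drop (cs.length - k) := by
        have h1 : cs.length - k - 2 + 1 = cs.length - k - 1 := by omega
        rw [h1, List.drop_eq_getElem_cons (by omega),
          show cs.length - k - 1 + 1 = cs.length - k from by omega]
      refine ⟨by simp [hlen], ?_⟩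
      intro j
      rw [List.getD_eq_getElem?_getD, hidx, hread, List.getElem?_set]
      by_cases hj : cs.length - k - 2 = j
      · rw [if_pos hj, if_pos (by rw [hlen]; omega), hr1, hget]
        have hcond : cs.length - 1 - (k + 1) ≤ j ∧ j < cs.length := by omega
        rw [if_pos hcond, ← hj, hsuffix]
        simp only [Option.getD_some, pvN]
        rw [Nat.mul_comm]
      · rw [if_neg hj, ← List.getD_eq_getElem?_getD, hval]
        by_cases h2 : cs.length - 1 - k ≤ j ∧ j < cs.length
        · rw [if_pos h2, if_pos (by omega)]
        · rw [if_neg h2, if_neg (by omega)]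

-- splitting range (|L| * M) into |L| blocks of M
theorem flat_range (L : List String) (M : Nat) (g : Nat → String) :
    L.flatMap (fun m => (List.range M).map (fun k => m ++ g k))
      = (List.range (L.length * M)).map (fun k => L.getD (k / M) "" ++ g (k % M)) := by
  rcases Nat.eq_zero_or_pos M with rfl | hM
  · simp
  · induction L with
    | nil => simp
    | cons m L' ih =>
        have hsplit : (m :: L').length * M = M + L'.length * M := by
          simp [List.length_cons]; ring
        rw [hsplit, List.range_add, List.map_append, List.flatMap_cons, ih]
        congr 1
        · apply List.map_congr_left
          intro k hk
          have hk' : k < M := List.mem_range.1 hk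
          rw [Nat.div_eq_of_lt hk', Nat.mod_eq_of_lt hk']
          simp
        · rw [List.map_map]
          apply List.map_congr_left
          intro k _
          have h1 : (M + k) / M = k / M + 1 := by
            rw [Nat.add_comm]; exact Nat.add_div_right k hM
          have h2 : (M + k) % M = k % M := Nat.add_mod_left M k
          simp [Function.comp, h1, h2]

-- B's fold computes the mixed-radix table
theorem alt_fold (mp : List (String × List String)) (l : List Char) :
    ∀ acc : List String,
      l.foldl (fun outl ch => outl.flatMap (fun p => (pvLookup mp ch).map (fun rep => p ++ rep))) acc
        = acc.flatMap (fun p => (List.range (pvN mp l)).map (fun k => p ++ pvDig mp l k)) := by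
  induction l with
  | nil =>
      intro acc
      simp [pvN, pvDig, List.range_succ]
  | cons c r ih =>
      intro acc
      rw [List.foldl_cons, ih, List.flatMap_assoc]
      apply List.flatMap_congr  -- pointwise
      intro p _
      rw [List.flatMap_map]
      have := flat_range (pvLookup mp c) (pvN mp r) (fun k => pvDig mp r k)
      calc (pvLookup mp c).flatMap
            (fun m => (List.range (pvN mp r)).map (fun k => (p ++ m) ++ pvDig mp r k))
          = ((pvLookup mp c).flatMap
              (fun m => (List.range (pvN mp r)).map (fun k => m ++ pvDig mp r k))).map (fun t => p ++ t) := by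
            rw [List.map_flatMap]
            apply List.flatMap_congr
            intro m _
            rw [List.map_map]
            apply List.map_congr_left
            intro k _
            simp [String.append_assoc]
        _ = (List.range (pvN mp (c :: r))).map (fun k => p ++ pvDig mp (c :: r) k) := by
            rw [this, List.map_map]
            show _ = (List.range ((pvLookup mp c).length * pvN mp r)).map _
            apply List.map_congr_left
            intro k _
            simp [Function.comp, pvDig]

-- outer loop of A over the suffix 'rest' of cs, starting at index i0
theorem outer_gen (mp : List (String × List String)) (cs : List Char) (N : Nat) (mreps : List Nat)
    (hmr : ∀ j, j < cs.length → mreps.getD j 0 = pvN mp (cs.drop (j + 1)))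
    (hpos : ∀ c ∈ cs, 0 < (pvLookup mp c).length) :
    ∀ (rest : List Char) (i0 : Nat), cs.drop i0 = rest → ∀ f : Nat → String,
      (List.range' i0 rest.length).foldl
        (fun o i => pvInner (pvLookup mp (cs.getD i ' ')) (mreps.getD i 0) N o)
        ((List.range N).map f)
      = (List.range N).map (fun c => f c ++ pvDig mp rest (c % pvN mp rest)) := by
  intro rest
  induction rest with
  | nil =>
      intro i0 _ f
      simp [pvDig]
  | cons ch rest' ih =>
      intro i0 hdrop f
      have hi0 : i0 < cs.length := by
        by_contra h
        rw [List.drop_eq_nil_of_le (by omega)] at hdrop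
        exact List.cons_ne_nil _ _ hdrop.symm
      have hgetE : cs[i0]'hi0 = ch := by
        have h0 : (cs.drop i0)[0]? = some ch := by rw [hdrop]; rfl
        rw [List.getElem?_drop] at h0
        simpa [List.getElem?_eq_getElem hi0] using h0
      have hget : cs.getD i0 ' ' = ch := by
        rw [List.getD_eq_getElem?_getD, List.getElem?_eq_getElem hi0, hgetE]
        rfl
      have hrest' : cs.drop (i0 + 1) = rest' := by
        have h1 : (cs.drop i0).drop 1 = rest' := by rw [hdrop]; rfl
        rwa [List.drop_drop] at h1
      have hmem : ch ∈ cs := hgetE ▸ List.getElem_mem hi0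
      have hL : 0 < (pvLookup mp ch).length := hpos ch hmem
      have hmrep : mreps.getD i0 0 = pvN mp rest' := by rw [hmr i0 hi0, hrest']
      simp only [List.length_cons]
      rw [List.range'_succ, List.foldl_cons, hget, hmrep,
          pvInner_map_range (pvLookup mp ch) (pvN mp rest') N f hL,
          ih (i0 + 1) hrest']
      apply List.map_congr_left
      intro c hc
      have hcN : c < N := List.mem_range.1 hc
      simp only [hcN, if_true]
      rw [String.append_assoc]
      congr 1
      show _ = pvDig mp (ch :: rest') (c % pvN mp (ch :: rest'))
      have hNN : pvN mp (ch :: rest') = (pvLookup mp ch).length * pvN mp rest' := rfl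
      rw [pvDig, hNN]
      congr 1
      · congr 1
        rw [Nat.mul_comm, Nat.mod_mul_right_div_self]
      · congr 1
        rw [Nat.mod_mod_of_dvd]
        exact dvd_mul_left _ _

theorem replicate_eq_map_range (N : Nat) :
    List.replicate N "" = (List.range N).map (fun _ => "") := by
  rw [List.map_const']
  simp

-- main equivalence
theorem all_maps_eq (mp : List (String × List String)) (s : String) (hs : s.toList ≠ []) :
    all_maps mp s = all_maps_alt mp s := by
  unfold all_maps all_maps_alt
  simp only []
  set cs := s.toList with hcs
  have hN : cs.foldl (fun acc e => acc * (pvLookup mp e).length) 1 = pvN mp cs := by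
    rw [pvN_foldl]; exact Nat.one_mul _
  rw [hN, alt_fold]
  rcases Nat.eq_zero_or_pos (pvN mp cs) with h0 | hposN
  · -- N = 0: both sides are empty
    rw [h0]
    simp [pvInner]
  · -- N > 0: every mapping along s is non-empty
    have hpos := pvLen_pos_of_pvN_pos hposN
    obtain ⟨hlen, hval⟩ := mreps_inv mp cs hs (cs.length - 1) (Nat.le_refl _)
    have hmr : ∀ j, j < cs.length →
        (pvMrepsLoop mp cs (cs.length - 1)).getD j 0 = pvN mp (cs.drop (j + 1)) := by
      intro j hj
      rw [hval j]
      have hn : 0 < cs.length := List.length_pos_of_ne_nil hs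
      have : cs.length - 1 - (cs.length - 1) ≤ j ∧ j < cs.length := by omega
      rw [if_pos this]
    rw [replicate_eq_map_range, List.range_eq_range' (n := cs.length),
        outer_gen mp cs (pvN mp cs) _ hmr hpos cs 0 (by simp) (fun _ => "")]
    simp only [List.flatMap_cons, List.flatMap_nil, List.append_nil]
    apply List.map_congr_left
    intro c hc
    have : c % pvN mp cs = c := Nat.mod_eq_of_lt (List.mem_range.1 hc)
    rw [this, String.empty_append]

-- ===== VERDICT (by name: the statement is the Claim_ definition above) =====
theorem all_maps_spec : Claim_equal_all_maps := by
  intro mp s _ hpre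
  unfold Spec_all_maps
  exact all_maps_eq mp s hpre.1
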